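-- pv_equiv track=rewrite | github.com/mainSiddharthhoon/Assignment-Creator-Pro | ai_client.py | _trim_context
-- ===== SOURCE A (Python) =====
-- def _trim_context(messages, max_messages=8, max_tokens=3000):
--     """
--     Trims the conversation context to fit within model limits.
--     Uses a character-based heuristic (1 token approx 4 characters).
--     """
--     # 1. Keep only the last N messages
--     trimmed = messages[-max_messages:] if len(messages) > max_messages else messages
--
--     # 2. Estimate token count and further trim if needed
--     # (max_tokens * 4) characters is our safe limit
--     char_limit = max_tokens * 4
--
--     while trimmed:
--         total_chars = sum(len(m.get("content", "")) for m in trimmed)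
--         if total_chars <= char_limit or len(trimmed) == 1:
--             break
--         trimmed.pop(0) # Remove oldest message in the window
--
--     return trimmed
-- ===== SOURCE B (Python) =====
-- def _trim_context(messages, max_messages=8, max_tokens=3000):
--     """Single reverse pass: count how many trailing messages fit, then truncate once in place."""
--     trimmed = messages[-max_messages:] if len(messages) > max_messages else messages
--     char_limit = max_tokens * 4
--     total = 0
--     keep = 0
--     for m in reversed(trimmed):
--         total += len(m.get("content", ""))
--         if keep and total > char_limit:
--             break
--         keep += 1
--     del trimmed[:len(trimmed) - keep]
--     return trimmed
-- ===== Notes on version B (the rewrite author's own statement) =====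
-- stated objective: alternative
-- what changed: Replaces the pop(0)-and-re-sum while loop with a single reverse pass that accumulates content lengths and counts how many trailing messages fit, then truncates once in place; the trimming loop drops from O(k^2) to O(k) in the window size, though the slice step dominates so measured time is unchanged.
import Mathlib
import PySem

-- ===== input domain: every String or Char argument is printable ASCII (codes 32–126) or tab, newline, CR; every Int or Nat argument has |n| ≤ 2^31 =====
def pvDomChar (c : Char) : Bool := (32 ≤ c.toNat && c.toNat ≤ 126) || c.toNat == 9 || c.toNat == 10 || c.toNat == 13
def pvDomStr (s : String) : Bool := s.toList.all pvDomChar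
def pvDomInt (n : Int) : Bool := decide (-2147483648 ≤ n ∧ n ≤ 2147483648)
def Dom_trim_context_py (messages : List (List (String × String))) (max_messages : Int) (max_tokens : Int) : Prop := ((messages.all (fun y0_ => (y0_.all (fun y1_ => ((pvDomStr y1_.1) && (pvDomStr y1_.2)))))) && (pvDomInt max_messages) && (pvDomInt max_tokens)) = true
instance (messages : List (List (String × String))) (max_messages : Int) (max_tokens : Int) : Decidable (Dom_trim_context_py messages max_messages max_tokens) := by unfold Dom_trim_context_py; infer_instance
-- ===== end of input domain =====

-- B replaces A's pop(0)-and-re-sum while loop by one reverse pass counting how many trailing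
-- messages fit, then a single truncation (alternative decomposition; A mutates `messages` in place when
-- no slice is taken — B performs the same mutation via `del`; the equivalence proved is about the return value).

-- ===== PORT A =====
-- len(m.get("content", ""))
def pvC (m : List (String × String)) : Int :=
  PySem.Str.len (PySem.Dict.getD (PySem.Dict.ofList m) "content" "")

-- sum(len(m.get("content", "")) for m in trimmed)
def pvSumContents (l : List (List (String × String))) : Int :=
  l.foldl (fun acc m => acc + pvC m) 0

-- the `while trimmed:` loop of A
def pvALoop (limit : Int) : List (List (String × String)) → List (List (String × String))
  | [] => []
  | m :: rest =>
    if pvSumContents (m :: rest) ≤ limit ∨ rest = [] then m :: rest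
    else pvALoop limit rest

def trim_context_py (messages : List (List (String × String))) (max_messages : Int) (max_tokens : Int) : List (List (String × String)) :=
  let trimmed := if (PySem.List.len messages) > max_messages
                 then PySem.List.slice messages (some (-max_messages)) none
                 else messages
  pvALoop (max_tokens * 4) trimmed

-- ===== PORT B =====
-- the reverse-pass counting loop of B (iterates over reversed(trimmed), accumulating total / keep)
def pvBCount (limit : Int) : List (List (String × String)) → Int → Nat → Nat
  | [], _, keep => keep
  | m :: rest, total, keep =>
    let t := total + pvC m
    if keep ≠ 0 ∧ t > limit then keep else pvBCount limit rest t (keep + 1)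

def trim_context_py_alt (messages : List (List (String × String))) (max_messages : Int) (max_tokens : Int) : List (List (String × String)) :=
  let trimmed := if (PySem.List.len messages) > max_messages
                 then PySem.List.slice messages (some (-max_messages)) none
                 else messages
  let keep := pvBCount (max_tokens * 4) trimmed.reverse 0 0
  trimmed.drop (trimmed.length - keep)

-- ===== PRECONDITION & SPEC =====
def Spec_trim_context_py (messages : List (List (String × String))) (max_messages : Int) (max_tokens : Int) (out : List (List (String × String))) : Prop := out = trim_context_py_alt messages max_messages max_tokens
instance (messages : List (List (String × String))) (max_messages : Int) (max_tokens : Int) (out : List (List (String × String))) : Decidable (Spec_trim_context_py messages max_messages max_tokens out) := by unfold Spec_trim_context_py; infer_instance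

-- ===== CLAIM (what is proved, stated in full; the proofs are below) =====
def Claim_equal_trim_context_py : Prop := ∀ (messages : List (List (String × String))) (max_messages : Int) (max_tokens : Int), Dom_trim_context_py messages max_messages max_tokens → Spec_trim_context_py messages max_messages max_tokens (trim_context_py messages max_messages max_tokens)

-- ===== LEMMAS AND PROOFS =====

-- recursive form of the content-length sum
def pvS : List (List (String × String)) → Int
  | [] => 0
  | m :: rest => pvC m + pvS rest

-- length of the longest prefix whose running content-length sum stays ≤ b
def pvPfx (b : Int) : List (List (String × String)) → Nat
  | [] => 0
  | m :: rest => if pvC m ≤ b then 1 + pvPfx (b - pvC m) rest else 0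

theorem pvS_cons (m : List (String × String)) (rest : List (List (String × String))) :
    pvS (m :: rest) = pvC m + pvS rest := rfl

theorem pvPfx_cons (b : Int) (m : List (String × String)) (rest : List (List (String × String))) :
    pvPfx b (m :: rest) = if pvC m ≤ b then 1 + pvPfx (b - pvC m) rest else 0 := rfl

theorem pvC_nonneg (m : List (String × String)) : 0 ≤ pvC m := by
  simp [pvC]

theorem pvS_nonneg (l : List (List (String × String))) : 0 ≤ pvS l := by
  induction l with
  | nil => simp [pvS]
  | cons m rest ih => have := pvC_nonneg m; rw [pvS_cons]; omega

theorem pvS_append (xs ys : List (List (String × String))) : pvS (xs ++ ys) = pvS xs + pvS ys := by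
  induction xs with
  | nil => simp [pvS]
  | cons m rest ih => simp only [List.cons_append, pvS_cons, ih]; ring

theorem pvS_reverse (l : List (List (String × String))) : pvS l.reverse = pvS l := by
  induction l with
  | nil => rfl
  | cons m rest ih => rw [List.reverse_cons, pvS_append, pvS_cons, ih, pvS_cons, pvS]; ring

theorem pvSumContents_eq_aux (l : List (List (String × String))) (a : Int) :
    l.foldl (fun acc m => acc + pvC m) a = a + pvS l := by
  induction l generalizing a with
  | nil => simp [pvS]
  | cons m rest ih => simp only [List.foldl, pvS_cons, ih]; ring

theorem pvSumContents_eq (l : List (List (String × String))) : pvSumContents l = pvS l := by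
  simpa using pvSumContents_eq_aux l 0

theorem pvPfx_le_length (b : Int) (l : List (List (String × String))) : pvPfx b l ≤ l.length := by
  induction l generalizing b with
  | nil => simp [pvPfx]
  | cons m rest ih =>
    rw [pvPfx_cons]
    have := ih (b - pvC m)
    simp only [List.length_cons]
    split <;> omega

theorem pvPfx_full (b : Int) (l : List (List (String × String))) (h : pvS l ≤ b) :
    pvPfx b l = l.length := by
  induction l generalizing b with
  | nil => rfl
  | cons m rest ih =>
    rw [pvS_cons] at h
    have h1 := pvS_nonneg rest
    rw [pvPfx_cons, if_pos (by omega : pvC m ≤ b), ih (b - pvC m) (by omega)]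
    simp [Nat.add_comm]

theorem pvPfx_eq_length_sum_le (b : Int) (l : List (List (String × String))) (hne : l ≠ [])
    (h : pvPfx b l = l.length) : pvS l ≤ b := by
  induction l generalizing b with
  | nil => exact absurd rfl hne
  | cons m rest ih =>
    rw [pvPfx_cons] at h
    by_cases hc : pvC m ≤ b
    · rw [if_pos hc] at h
      simp only [List.length_cons] at h
      have h2 : pvPfx (b - pvC m) rest = rest.length := by omega
      rw [pvS_cons]
      by_cases hrnil : rest = []
      · subst hrnil; simp [pvS]; omega
      · have := ih (b - pvC m) hrnil h2
        omega
    · rw [if_neg hc] at h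
      simp at h

theorem pvPfx_append (b : Int) (xs ys : List (List (String × String))) :
    pvPfx b (xs ++ ys) =
      if pvPfx b xs = xs.length then xs.length + pvPfx (b - pvS xs) ys else pvPfx b xs := by
  induction xs generalizing b with
  | nil => simp [pvPfx, pvS]
  | cons m rest ih =>
    simp only [List.cons_append, pvPfx_cons, List.length_cons, pvS_cons]
    by_cases h : pvC m ≤ b
    · rw [if_pos h, if_pos h, ih (b - pvC m)]
      have hle := pvPfx_le_length (b - pvC m) rest
      by_cases h2 : pvPfx (b - pvC m) rest = rest.length
      · rw [if_pos h2, if_pos (by omega : 1 + pvPfx (b - pvC m) rest = rest.length + 1)]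
        have he : b - pvC m - pvS rest = b - (pvC m + pvS rest) := by ring
        rw [he]; omega
      · rw [if_neg h2, if_neg (by omega : ¬ 1 + pvPfx (b - pvC m) rest = rest.length + 1)]
    · rw [if_neg h, if_neg h, if_neg (by omega : ¬ (0 : Nat) = rest.length + 1)]

theorem pvPfx_of_neg (b : Int) (l : List (List (String × String))) (hb : b < 0) : pvPfx b l = 0 := by
  cases l with
  | nil => rfl
  | cons m rest =>
    have := pvC_nonneg m
    rw [pvPfx_cons, if_neg (by omega : ¬ pvC m ≤ b)]

theorem pvBCount_succ (limit : Int) (l : List (List (String × String))) (total : Int) (keep : Nat)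
    (hk : 1 ≤ keep) : pvBCount limit l total keep = keep + pvPfx (limit - total) l := by
  induction l generalizing total keep with
  | nil => simp [pvBCount, pvPfx]
  | cons m rest ih =>
    show (if keep ≠ 0 ∧ total + pvC m > limit then keep
          else pvBCount limit rest (total + pvC m) (keep + 1)) = keep + pvPfx (limit - total) (m :: rest)
    rw [pvPfx_cons]
    by_cases h : total + pvC m > limit
    · have hc : keep ≠ 0 ∧ total + pvC m > limit := ⟨by omega, h⟩
      rw [if_pos hc, if_neg (by omega : ¬ pvC m ≤ limit - total)]
      omega
    · rw [if_neg (fun hc => h hc.2), if_pos (by omega : pvC m ≤ limit - total),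
          ih (total + pvC m) (keep + 1) (by omega)]
      have he : limit - total - pvC m = limit - (total + pvC m) := by ring
      rw [he]; omega

theorem pvBCount_start (limit : Int) (m : List (String × String)) (rest : List (List (String × String))) :
    pvBCount limit (m :: rest) 0 0 = max 1 (pvPfx limit (m :: rest)) := by
  show (if (0 : Nat) ≠ 0 ∧ 0 + pvC m > limit then 0
        else pvBCount limit rest (0 + pvC m) (0 + 1)) = max 1 (pvPfx limit (m :: rest))
  rw [if_neg (by simp), pvBCount_succ limit rest (0 + pvC m) (0 + 1) (by omega), pvPfx_cons]
  by_cases h : pvC m ≤ limit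
  · rw [if_pos h]
    have he : limit - (0 + pvC m) = limit - pvC m := by ring
    rw [he]; omega
  · rw [if_neg h, pvPfx_of_neg _ _ (by have := pvC_nonneg m; omega)]
    omega

-- the central lemma: A's while loop equals B's drop-by-count
theorem pvLoop_eq (limit : Int) (l : List (List (String × String))) :
    pvALoop limit l = l.drop (l.length - pvBCount limit l.reverse 0 0) := by
  induction l with
  | nil => rfl
  | cons m rest ih =>
    by_cases hs : pvSumContents (m :: rest) ≤ limit
    · -- everything fits: keep whole list
      rw [pvALoop, if_pos (Or.inl hs)]
      obtain ⟨r0, rr, hrr⟩ := List.exists_cons_of_ne_nil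
        (show (m :: rest).reverse ≠ [] by simp)
      rw [hrr, pvBCount_start, ← hrr]
      have hfull : pvPfx limit (m :: rest).reverse = (m :: rest).reverse.length := by
        refine pvPfx_full _ _ ?_
        rw [pvS_reverse, ← pvSumContents_eq]; exact hs
      rw [hfull]
      have hz : (m :: rest).length - max 1 (m :: rest).reverse.length = 0 := by
        simp only [List.length_reverse, List.length_cons]
        omega
      rw [hz, List.drop_zero]
    · by_cases hrne : rest = []
      · subst hrne
        rw [pvALoop, if_pos (Or.inr rfl)]
        simp only [List.reverse_cons, List.reverse_nil, List.nil_append]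
        rw [pvBCount_start]
        have h1 := pvPfx_le_length limit [m]
        simp only [List.length_cons, List.length_nil] at h1
        have hK : max 1 (pvPfx limit [m]) = 1 := by omega
        rw [hK]
        rfl
      · rw [pvALoop, if_neg (by simp [hs, hrne]), ih]
        obtain ⟨a, as_, has⟩ := List.exists_cons_of_ne_nil
          (show rest.reverse ≠ [] by simpa using hrne)
        have happ : (m :: rest).reverse = rest.reverse ++ [m] := by simp
        have hKeq : pvBCount limit (m :: rest).reverse 0 0 = pvBCount limit rest.reverse 0 0 := by
          rw [happ, has, show (a :: as_) ++ [m] = a :: (as_ ++ [m]) from rfl,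
              pvBCount_start, pvBCount_start, show a :: (as_ ++ [m]) = (a :: as_) ++ [m] from rfl,
              pvPfx_append]
          by_cases hfull : pvPfx limit (a :: as_) = (a :: as_).length
          · have hsum : pvS (a :: as_) ≤ limit :=
              pvPfx_eq_length_sum_le limit (a :: as_) (by simp) hfull
            have hstot : pvC m + pvS rest > limit := by
              have := pvSumContents_eq (m :: rest)
              rw [pvS_cons] at this
              omega
            have hsr : pvS (a :: as_) = pvS rest := by rw [← has, pvS_reverse]
            have hm0 : pvPfx (limit - pvS (a :: as_)) [m] = 0 := by
              rw [pvPfx_cons, if_neg (by omega : ¬ pvC m ≤ limit - pvS (a :: as_))]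
            rw [if_pos hfull, hm0, hfull]
            omega
          · rw [if_neg hfull]
        rw [hKeq]
        have hKle : pvBCount limit rest.reverse 0 0 ≤ rest.length := by
          rw [has, pvBCount_start]
          have h1 := pvPfx_le_length limit (a :: as_)
          have h2 : (a :: as_).length = rest.length := by
            rw [← has]; simp
          have h3 : 1 ≤ rest.length := List.length_pos_of_ne_nil hrne
          omega
        have hstep : (m :: rest).length - pvBCount limit rest.reverse 0 0
            = (rest.length - pvBCount limit rest.reverse 0 0) + 1 := by
          simp only [List.length_cons]; omega
        rw [hstep, List.drop_succ_cons]

-- ===== VERDICT (by name: the statement is the Claim_ definition above) =====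
theorem trim_context_py_spec : Claim_equal_trim_context_py := by
  intro messages max_messages max_tokens _
  show trim_context_py messages max_messages max_tokens = trim_context_py_alt messages max_messages max_tokens
  unfold trim_context_py trim_context_py_alt
  exact pvLoop_eq _ _
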